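-- pv_equiv track=rewrite | github.com/kamrul-pu/problem-solving | leetcode/array/29_reverse_pairs.py | __burte
-- ===== SOURCE A (Python) =====
-- from typing import List
--
-- def __burte(nums: List[int]) -> int:
--     n: int = len(nums)
--     cnt: int = 0
--
--     # Iterate over all pairs (i, j) where i < j and nums[i] > 2 * nums[j]
--     for i in range(n - 1):
--         for j in range(i + 1, n):
--             if nums[i] > 2 * nums[j]:
--                 cnt += 1
--
--     return cnt
-- ===== SOURCE B (Python) =====
-- from bisect import bisect_right, insort
-- from typing import List
--
-- def __burte(nums: List[int]) -> int:
--     cnt = 0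
--     seen = []  # sorted multiset of the values already passed
--     for x in nums:
--         # previously seen values greater than 2*x
--         cnt += len(seen) - bisect_right(seen, 2 * x)
--         insort(seen, x)
--     return cnt
-- ===== Notes on version B (the rewrite author's own statement) =====
-- stated objective: faster
-- what changed: replaces the O(n^2) nested index loops with a single left-to-right pass that keeps the already-seen values in a sorted list and counts, for each element x, the earlier values greater than 2*x by binary search (bisect_right + insort)
import Mathlib
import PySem

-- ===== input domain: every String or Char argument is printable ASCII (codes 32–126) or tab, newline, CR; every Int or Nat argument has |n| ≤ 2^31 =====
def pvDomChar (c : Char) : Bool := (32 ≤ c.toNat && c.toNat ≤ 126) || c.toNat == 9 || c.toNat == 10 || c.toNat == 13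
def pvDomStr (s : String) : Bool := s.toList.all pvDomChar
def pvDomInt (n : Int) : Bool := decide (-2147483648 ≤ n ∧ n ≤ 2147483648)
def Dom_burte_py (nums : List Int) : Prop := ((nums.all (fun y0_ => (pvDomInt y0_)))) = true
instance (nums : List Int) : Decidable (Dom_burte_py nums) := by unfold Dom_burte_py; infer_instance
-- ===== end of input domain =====

-- B replaces A's O(n^2) nested index loops by one left-to-right pass that keeps the values
-- already seen in a sorted list and counts, per element x, the earlier values > 2*x by binary
-- search (bisect_right); same return value on every input.

-- ===== PORT A =====
-- for i in range(n-1): for j in range(i+1, n): if nums[i] > 2*nums[j]: cnt += 1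
def burte_py (nums : List Int) : Int :=
  let n : Int := PySem.List.len nums
  (PySem.List.pyRange 0 (n - 1) 1).foldl (fun cnt i =>
    (PySem.List.pyRange (i + 1) n 1).foldl (fun cnt j =>
      if PySem.List.pyGetD nums i 0 > 2 * PySem.List.pyGetD nums j 0 then cnt + 1 else cnt)
      cnt) 0

-- ===== PORT B =====
-- single pass: cnt += len(seen) - bisect_right(seen, 2*x); insort(seen, x)
def burte_py_alt (nums : List Int) : Int :=
  (nums.foldl (fun (st : Int × List Int) x =>
      (st.1 + ((st.2.length : Int) - (PySem.List.bisectRight st.2 (2 * x) : Int)),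
       PySem.List.insertBy (fun a b => decide (a < b)) x st.2))
    (0, ([] : List Int))).1

-- ===== PRECONDITION & SPEC =====
def Spec_burte_py (nums : List Int) (out : Int) : Prop := out = burte_py_alt nums
instance (nums : List Int) (out : Int) : Decidable (Spec_burte_py nums out) := by unfold Spec_burte_py; infer_instance

-- ===== CLAIM (what is proved, stated in full; the proofs are below) =====
def Claim_equal_burte_py : Prop := ∀ (nums : List Int), Dom_burte_py nums → Spec_burte_py nums (burte_py nums)

-- ===== LEMMAS AND PROOFS =====

-- number of pairs i < j with nums[i] > 2*nums[j], recursively by the first element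
def pvPC : List Int → Int
  | [] => 0
  | x :: xs => (xs.countP (fun y => decide (2 * y < x)) : Int) + pvPC xs

theorem pvPC_append_singleton (l : List Int) (x : Int) :
    pvPC (l ++ [x]) = pvPC l + (l.countP (fun y => decide (2 * x < y)) : Int) := by
  induction l with
  | nil => simp [pvPC]
  | cons a l ih =>
      simp only [List.cons_append, pvPC, ih, List.countP_append, List.countP_cons,
        List.countP_nil]
      push_cast
      by_cases h1 : 2 * x < a <;> simp [h1] <;> ring

-- the inner loop of A adds, for row i, the count of later elements y with nums[i] > 2*y
theorem pvA_inner (nums : List Int) (i : Int) (hi : 0 ≤ i) (c : Int) :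
    (PySem.List.pyRange (i + 1) ((nums.length : Int)) 1).foldl (fun cnt j =>
        if PySem.List.pyGetD nums i 0 > 2 * PySem.List.pyGetD nums j 0 then cnt + 1 else cnt) c
      = c + ((nums.drop (i + 1).toNat).countP
          (fun y => decide (2 * y < PySem.List.pyGetD nums i 0)) : Int) := by
  rw [PySem.List.foldl_pyRange_pyGetD' nums 0
      (fun cnt y => if PySem.List.pyGetD nums i 0 > 2 * y then cnt + 1 else cnt) c (by omega)]
  have := PySem.List.foldl_count_if (fun y => decide (2 * y < PySem.List.pyGetD nums i 0))
      (nums.drop (i + 1).toNat) c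
  simpa [gt_iff_lt] using this

-- row sums over the whole index range equal the recursive pair count
theorem pvA_sum (nums : List Int) :
    ((PySem.List.pyRange 0 (nums.length : Int) 1).map (fun i =>
        ((nums.drop (i + 1).toNat).countP
          (fun y => decide (2 * y < PySem.List.pyGetD nums i 0)) : Int))).sum = pvPC nums := by
  induction nums with
  | nil => simp [pvPC]
  | cons x xs ih =>
      rw [PySem.List.pyRange_one_cons (by simp)]
      simp only [List.map_cons, List.sum_cons]
      have htail : (PySem.List.pyRange (0 + 1) ((x :: xs).length : Int) 1).map (fun i =>
            ((List.drop (i + 1).toNat (x :: xs)).countP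
              (fun y => decide (2 * y < PySem.List.pyGetD (x :: xs) i 0)) : Int))
          = (PySem.List.pyRange 0 (xs.length : Int) 1).map (fun i =>
            ((List.drop (i + 1).toNat xs).countP
              (fun y => decide (2 * y < PySem.List.pyGetD xs i 0)) : Int)) := by
        rw [PySem.List.pyRange_one (0 + 1), PySem.List.pyRange_one 0]
        simp only [List.map_map]
        have hlen : (((x :: xs).length : Int) - (0 + 1)).toNat = ((xs.length : Int) - 0).toNat := by
          simp
        rw [hlen]
        apply List.map_congr_left
        intro k hk
        simp only [Function.comp]
        have h3 : (0 : Int) + 1 + (k : Int) = ((k + 1 : Nat) : Int) := by omega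
        have h4 : (0 : Int) + (k : Int) = ((k : Nat) : Int) := by omega
        simp only [h3, h4, PySem.List.pyGetD_natCast]
        simp [show ((k : Int) + 1 + 1).toNat = k + 2 from by omega,
          show ((k : Int) + 1).toNat = k + 1 from by omega, List.drop_succ_cons]
      rw [htail, ih]
      simp [pvPC, PySem.List.pyGetD_zero_cons]

theorem pvA_eq_pvPC (nums : List Int) : burte_py nums = pvPC nums := by
  by_cases hnil : nums = []
  · subst hnil
    simp [burte_py, pvPC, PySem.List.len]
  · have hlen : 1 ≤ (nums.length : Int) := by
      have : nums.length ≠ 0 := fun h => hnil (List.length_eq_zero_iff.mp h)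
      omega
    have hext : PySem.List.pyRange 0 ((nums.length : Int) - 1 + 1) 1
        = PySem.List.pyRange 0 ((nums.length : Int) - 1) 1 ++ [(nums.length : Int) - 1] :=
      PySem.List.pyRange_one_succ_right (by omega)
    have hb : burte_py nums
        = (PySem.List.pyRange 0 ((nums.length : Int) - 1) 1).foldl (fun cnt i =>
          (PySem.List.pyRange (i + 1) ((nums.length : Int)) 1).foldl (fun cnt j =>
            if PySem.List.pyGetD nums i 0 > 2 * PySem.List.pyGetD nums j 0 then cnt + 1 else cnt)
            cnt) 0 := rfl
    have hfold : ∀ (r : List Int) (c : Int), (∀ i ∈ r, 0 ≤ i) →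
        r.foldl (fun cnt i =>
          (PySem.List.pyRange (i + 1) ((nums.length : Int)) 1).foldl (fun cnt j =>
            if PySem.List.pyGetD nums i 0 > 2 * PySem.List.pyGetD nums j 0 then cnt + 1 else cnt)
            cnt) c
        = c + (r.map (fun i => ((nums.drop (i + 1).toNat).countP
            (fun y => decide (2 * y < PySem.List.pyGetD nums i 0)) : Int))).sum := by
      intro r
      induction r with
      | nil => intro c _; simp
      | cons i r ihr =>
          intro c hr
          simp only [List.foldl_cons, List.map_cons, List.sum_cons]
          rw [pvA_inner nums i (hr i (by simp)) c, ihr _ (fun j hj => hr j (by simp [hj]))]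
          ring
    have hmem : ∀ i ∈ PySem.List.pyRange 0 ((nums.length : Int) - 1) 1, 0 ≤ i := by
      intro i hi
      have := PySem.List.mem_pyRange_one.mp hi
      omega
    rw [hb, hfold _ 0 hmem]
    rw [← pvA_sum nums]
    conv_rhs => rw [show (nums.length : Int) = (nums.length : Int) - 1 + 1 from by ring, hext]
    simp

-- on a sorted list, the elements strictly greater than v are exactly those from bisectRight on
theorem pvCount_sorted (s : List Int) (v : Int) (hs : s.Pairwise (fun a b => a ≤ b)) :
    (s.length : Int) - (PySem.List.bisectRight s v : Int)
      = (s.countP (fun y => decide (v < y)) : Int) := by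
  obtain ⟨hk, hlo, hhi⟩ := PySem.List.bisectRight_spec s v hs
  set k := PySem.List.bisectRight s v with hkdef
  have h1 : (s.take k).countP (fun y => decide (v < y)) = 0 := by
    rw [List.countP_eq_zero]
    intro a ha
    obtain ⟨i, hi, rfl⟩ := List.mem_iff_getElem.mp ha
    have hik : i < k := lt_of_lt_of_le hi (by simp [List.length_take])
    have hilen : i < s.length := lt_of_lt_of_le hik hk
    rw [List.getElem_take]
    simpa using not_lt.mpr (hlo i hilen hik)
  have h2 : (s.drop k).countP (fun y => decide (v < y)) = (s.drop k).length := by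
    rw [List.countP_eq_length]
    intro a ha
    obtain ⟨i, hi, rfl⟩ := List.mem_iff_getElem.mp ha
    have hilen : k + i < s.length := by
      have := hi; simp [List.length_drop] at this; omega
    rw [List.getElem_drop]
    simpa using hhi (k + i) hilen (Nat.le_add_right k i)
  have hsplit : s.countP (fun y => decide (v < y))
      = (s.take k).countP (fun y => decide (v < y)) + (s.drop k).countP (fun y => decide (v < y)) := by
    conv_lhs => rw [← List.take_append_drop k s]
    rw [List.countP_append]
  have hdl : (s.drop k).length = s.length - k := List.length_drop
  omega

-- one step of B's loop maintains (pair count so far, sorted prefix)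
theorem pvB_step (p : List Int) (x : Int) :
    PySem.List.insertBy (fun a b => decide (a < b)) x (PySem.List.sorted p (fun y => y))
      = PySem.List.sorted (p ++ [x]) (fun y => y) := by
  rw [PySem.List.sorted_eq_foldl_insertBy p, PySem.List.sorted_eq_foldl_insertBy (p ++ [x]),
    List.foldl_append]
  simp

theorem pvB_inv (rest : List Int) (p : List Int) :
    (rest.foldl (fun (st : Int × List Int) x =>
        (st.1 + ((st.2.length : Int) - (PySem.List.bisectRight st.2 (2 * x) : Int)),
         PySem.List.insertBy (fun a b => decide (a < b)) x st.2))
      (pvPC p, PySem.List.sorted p (fun y => y))).1 = pvPC (p ++ rest) := by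
  induction rest generalizing p with
  | nil => simp
  | cons x rest ih =>
      have hsorted : (PySem.List.sorted p (fun y => y)).Pairwise (fun a b => a ≤ b) := by
        simpa using PySem.List.sorted_pairwise p (fun y => y)
      have hcnt : pvPC p + (((PySem.List.sorted p (fun y => y)).length : Int)
            - (PySem.List.bisectRight (PySem.List.sorted p (fun y => y)) (2 * x) : Int))
          = pvPC (p ++ [x]) := by
        rw [pvCount_sorted _ _ hsorted,
          (PySem.List.sorted_perm p (fun y => y) false).countP_eq (fun y => decide (2 * x < y)),
          pvPC_append_singleton]
      simp only [List.foldl_cons]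
      rw [show (pvPC p + (((PySem.List.sorted p (fun y => y)).length : Int)
            - (PySem.List.bisectRight (PySem.List.sorted p (fun y => y)) (2 * x) : Int)),
          PySem.List.insertBy (fun a b => decide (a < b)) x (PySem.List.sorted p (fun y => y)))
          = (pvPC (p ++ [x]), PySem.List.sorted (p ++ [x]) (fun y => y)) from by
        rw [hcnt, pvB_step]]
      rw [ih (p ++ [x])]
      simp

theorem pvB_eq_pvPC (nums : List Int) : burte_py_alt nums = pvPC nums := by
  unfold burte_py_alt
  have h0 : ((0 : Int), ([] : List Int)) = (pvPC [], PySem.List.sorted ([] : List Int) (fun y => y)) := by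
    rw [PySem.List.sorted_eq_foldl_insertBy]
    simp [pvPC]
  rw [h0, pvB_inv nums []]
  simp

-- ===== VERDICT (by name: the statement is the Claim_ definition above) =====
theorem burte_py_spec : Claim_equal_burte_py := by
  intro nums _
  unfold Spec_burte_py
  rw [pvA_eq_pvPC, pvB_eq_pvPC]
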